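-- pv_equiv track=rewrite | github.com/atvKail/solve | olympiads/traning/УрфуТренировки/17/B.py | solve
-- ===== SOURCE A (Python) =====
-- def prefix_function(s):
--     n = len(s)
--     pi = [0] * n
--     for i in range(1, n):
--         j = pi[i - 1]
--         while j > 0 and s[i] != s[j]:
--             j = pi[j - 1]
--         if s[i] == s[j]:
--             j += 1
--         pi[i] = j
--     return pi
--
-- def longest_palindrome_prefix(mid):
--     temp = mid + "#" + mid[::-1]
--     pi = prefix_function(temp)
--     length = pi[-1]
--     return mid[:length]
--
-- def longest_palindrome_suffix(mid):
--     rev_mid = mid[::-1]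
--     temp = rev_mid + "#" + mid
--     pi = prefix_function(temp)
--     length = pi[-1]
--     return mid[len(mid) - length :]
--
-- def solve(s):
--     n = len(s)
--     l, r = 0, n - 1
--     while l < r and s[l] == s[r]:
--         l += 1
--         r -= 1
--
--     if l >= r:
--         return s
--     else:
--         prefix = s[:l]
--         suffix = s[r + 1 :]
--         mid = s[l : r + 1]
--         cand1 = longest_palindrome_prefix(mid)
--         cand2 = longest_palindrome_suffix(mid)
--         if len(cand1) >= len(cand2):
--             midpal = cand1
--         else:
--             midpal = cand2
--         return prefix + midpal + suffix
-- ===== SOURCE B (Python) =====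
-- def longest_border(t):
--     for L in range(len(t) - 1, 0, -1):
--         if t[:L] == t[len(t) - L:]:
--             return L
--     return 0
--
-- def solve(s):
--     n = len(s)
--     l, r = 0, n - 1
--     while l < r and s[l] == s[r]:
--         l += 1
--         r -= 1
--
--     if l >= r:
--         return s
--
--     prefix = s[:l]
--     suffix = s[r + 1:]
--     mid = s[l:r + 1]
--     cand1 = mid[:longest_border(mid + "#" + mid[::-1])]
--     cand2 = mid[len(mid) - longest_border(mid[::-1] + "#" + mid):]
--     if len(cand1) >= len(cand2):
--         midpal = cand1
--     else:
--         midpal = cand2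
--     return prefix + midpal + suffix
-- ===== Notes on version B (the rewrite author's own statement) =====
-- stated objective: simpler
-- what changed: The KMP prefix-function machinery (failure-link array, inner while loop over pi) is removed: pi[-1] is computed directly as the longest proper border by scanning L from len(t)-1 down and returning the first L with t[:L] == t[len(t)-L:]; the outer two-pointer strip loop, slicing and the prefix-favouring tie rule are unchanged.
import Mathlib
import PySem

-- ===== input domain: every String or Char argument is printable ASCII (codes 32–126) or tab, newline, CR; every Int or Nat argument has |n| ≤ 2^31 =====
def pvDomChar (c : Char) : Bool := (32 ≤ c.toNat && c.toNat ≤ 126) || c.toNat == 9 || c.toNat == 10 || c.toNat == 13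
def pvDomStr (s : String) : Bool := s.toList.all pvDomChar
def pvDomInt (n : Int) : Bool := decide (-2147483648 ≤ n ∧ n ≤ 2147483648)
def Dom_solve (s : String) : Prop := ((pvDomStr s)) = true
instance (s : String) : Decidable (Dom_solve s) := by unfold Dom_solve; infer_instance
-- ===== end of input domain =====

-- B replaces the KMP prefix-function helpers by a direct longest-proper-border scan (pi[-1] IS
-- that border); the outer strip loop, the slicing and the tie rule are unchanged; no side effects.

-- ===== PORT A =====

-- the inner `while j > 0 and s[i] != s[j]: j = pi[j-1]`; first Nat argument is fuel
-- (the loop strictly decreases j, so fuel := initial j suffices; proved in pvWhileJ_fuel below)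
def pvWhileJ (t : List Char) (pi : List Nat) (ci : Char) : Nat → Nat → Nat
  | 0, j => j
  | f + 1, j => if 0 < j ∧ ci ≠ t.getD j ' ' then pvWhileJ t pi ci f (pi.getD (j - 1) 0) else j

-- one iteration of `for i in range(1, n)` in prefix_function
def pvPFStep (t : List Char) (pi : List Nat) (i : Nat) : List Nat :=
  let j0 := pi.getD (i - 1) 0
  let j1 := pvWhileJ t pi (t.getD i ' ') j0 j0
  let j2 := if t.getD i ' ' = t.getD j1 ' ' then j1 + 1 else j1
  pi.set i j2

def pvPrefixFun (t : List Char) : List Nat :=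
  (List.range' 1 (t.length - 1)).foldl (pvPFStep t) (List.replicate t.length 0)

-- pi[-1]; pi is nonempty at every call site (mid is nonempty), where this equals Python's pi[-1]
def pvLastD (pi : List Nat) : Nat := pi.getD (pi.length - 1) 0

def pvLPP (mid : List Char) : List Char :=
  let len := pvLastD (pvPrefixFun (mid ++ '#' :: mid.reverse))
  mid.take len

def pvLPS (mid : List Char) : List Char :=
  let len := pvLastD (pvPrefixFun (mid.reverse ++ '#' :: mid))
  PySem.List.slice mid (some ((mid.length : Int) - (len : Int))) none

-- `while l < r and s[l] == s[r]: l += 1; r -= 1`; fuel = len(s) suffices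
def pvStripLoop (cs : List Char) : Nat → Int × Int → Int × Int
  | 0, lr => lr
  | f + 1, (l, r) =>
      if l < r ∧ cs.getD l.toNat ' ' = cs.getD r.toNat ' ' then pvStripLoop cs f (l + 1, r - 1)
      else (l, r)

def solve (s : String) : String :=
  let cs := s.toList
  let n := cs.length
  let lr := pvStripLoop cs n (0, (n : Int) - 1)
  let l := lr.1
  let r := lr.2
  if r ≤ l then s
  else
    let pre := PySem.List.slice cs none (some l)
    let suf := PySem.List.slice cs (some (r + 1)) none
    let mid := PySem.List.slice cs (some l) (some (r + 1))
    let cand1 := pvLPP mid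
    let cand2 := pvLPS mid
    let midpal := if cand2.length ≤ cand1.length then cand1 else cand2
    String.ofList (pre ++ midpal ++ suf)

-- ===== PORT B =====

-- `for L in range(len(t)-1, 0, -1): if t[:L] == t[len(t)-L:]: return L` / `return 0`;
-- the Nat argument is the loop's current L (first call: len(t) - 1)
def pvBorderScan (t : List Char) : Nat → Nat
  | 0 => 0
  | L + 1 => if t.take (L + 1) = t.drop (t.length - (L + 1)) then L + 1 else pvBorderScan t L

def solve_alt (s : String) : String :=
  let cs := s.toList
  let n := cs.length
  let lr := pvStripLoop cs n (0, (n : Int) - 1)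
  let l := lr.1
  let r := lr.2
  if r ≤ l then s
  else
    let pre := PySem.List.slice cs none (some l)
    let suf := PySem.List.slice cs (some (r + 1)) none
    let mid := PySem.List.slice cs (some l) (some (r + 1))
    let t1 := mid ++ '#' :: mid.reverse
    let t2 := mid.reverse ++ '#' :: mid
    let cand1 := mid.take (pvBorderScan t1 (t1.length - 1))
    let cand2 := PySem.List.slice mid
      (some ((mid.length : Int) - (pvBorderScan t2 (t2.length - 1) : Int))) none
    let midpal := if cand2.length ≤ cand1.length then cand1 else cand2
    String.ofList (pre ++ midpal ++ suf)

-- ===== PRECONDITION & SPEC =====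

def Spec_solve (s : String) (out : String) : Prop := out = solve_alt s
instance (s : String) (out : String) : Decidable (Spec_solve s out) := by
  unfold Spec_solve; infer_instance

-- ===== CLAIM =====
def Claim_equal_solve : Prop := ∀ (s : String), Dom_solve s → Spec_solve s (solve s)

-- ===== LEMMAS AND PROOFS =====

-- `L is a border of t` (as a string equation; meaningful for L ≤ t.length)
def BrdP (t : List Char) (L : Nat) : Prop := t.take L = t.drop (t.length - L)

-- length of the longest proper border of t
def pvBrd (t : List Char) : Nat :=
  Nat.findGreatest (fun L => t.take L = t.drop (t.length - L)) (t.length - 1)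

lemma brdP_zero (t : List Char) : BrdP t 0 := by simp [BrdP]

lemma pvBrd_le (t : List Char) : pvBrd t ≤ t.length - 1 := Nat.findGreatest_le _

lemma pvBrd_spec (t : List Char) : BrdP t (pvBrd t) := by
  have h0 : BrdP t 0 := brdP_zero t
  exact Nat.findGreatest_spec (Nat.zero_le _) h0

lemma le_pvBrd {t : List Char} {L : Nat} (h : BrdP t L) (hL : L ≤ t.length - 1) : L ≤ pvBrd t :=
  Nat.le_findGreatest hL h

lemma border_take_iff {t : List Char} {a b : Nat} (hb : BrdP t b) (hble : b ≤ t.length)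
    (hab : a ≤ b) : BrdP (t.take b) a ↔ BrdP t a := by
  unfold BrdP at *
  have hlt : (t.take b).length = b := by simp; omega
  rw [hlt, List.take_take, Nat.min_eq_left hab, hb, List.drop_drop]
  have : t.length - b + (b - a) = t.length - a := by omega
  rw [this]

lemma border_succ_iff {t : List Char} {i k : Nat} (hi : i < t.length) (hk : k + 1 ≤ i) :
    BrdP (t.take (i + 1)) (k + 1) ↔ BrdP (t.take i) k ∧ t.getD k ' ' = t.getD i ' ' := by
  have hkt : k < t.length := by omega
  have hti : (t.take i).length = i := by simp; omega
  have h1 : t.take (i + 1) = t.take i ++ [t[i]] := by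
    rw [List.take_add_one, List.getElem?_eq_getElem hi]; rfl
  have h2 : t.take (k + 1) = t.take k ++ [t[k]] := by
    rw [List.take_add_one, List.getElem?_eq_getElem hkt]; rfl
  unfold BrdP
  have hlen : (t.take (i + 1)).length = i + 1 := by simp; omega
  rw [hlen]
  have hsub : i + 1 - (k + 1) = i - k := by omega
  rw [hsub, h1]
  rw [List.take_append_of_le_length (by omega), List.drop_append_of_le_length (by omega)]
  have h3 : List.take (k+1) (t.take i) = t.take (k+1) := by
    rw [List.take_take, Nat.min_eq_left (by omega)]
  rw [h3, h2, hti]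
  have h4 : List.take k (t.take i) = t.take k := by
    rw [List.take_take, Nat.min_eq_left (by omega)]
  constructor
  · intro h
    obtain ⟨he, hs⟩ := List.append_inj' h (by simp)
    refine ⟨by rw [h4]; exact he, ?_⟩
    rw [List.getD_eq_getElem t ' ' hkt, List.getD_eq_getElem t ' ' hi]
    simpa using hs
  · rintro ⟨he, hs⟩
    rw [h4] at he
    rw [he]
    congr 1
    rw [List.getD_eq_getElem t ' ' hkt, List.getD_eq_getElem t ' ' hi] at hs
    rw [hs]

lemma pvWhileJ_fuel {t : List Char} {pi : List Nat} {ci : Char} :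
    ∀ j, (∀ j', 0 < j' → j' ≤ j → pi.getD (j' - 1) 0 < j') →
      ∀ f, j ≤ f → pvWhileJ t pi ci f j = pvWhileJ t pi ci j j := by
  intro j
  induction j using Nat.strong_induction_on with
  | _ j ih =>
    intro hchain f hf
    match j, hf with
    | 0, _ =>
      cases f with
      | zero => rfl
      | succ ff => simp [pvWhileJ]
    | jj + 1, _ =>
      cases f with
      | zero => omega
      | succ ff =>
        simp only [pvWhileJ]
        by_cases hc : 0 < jj + 1 ∧ ci ≠ t.getD (jj + 1) ' '
        · rw [if_pos hc, if_pos hc]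
          have hj2 : pi.getD (jj + 1 - 1) 0 < jj + 1 := hchain (jj + 1) (by omega) (le_refl _)
          set j2 := pi.getD (jj + 1 - 1) 0 with hj2def
          have hch2 : ∀ j', 0 < j' → j' ≤ j2 → pi.getD (j' - 1) 0 < j' := by
            intro j' h1 h2; exact hchain j' h1 (by omega)
          rw [ih j2 (by omega) hch2 ff (by omega), ih j2 (by omega) hch2 jj (by omega)]
        · rw [if_neg hc, if_neg hc]

lemma pvWhileJ_spec {t : List Char} {pi : List Nat} {i : Nat}
    (hi : i < t.length) (_hi1 : 1 ≤ i)
    (hpi : ∀ m, m < i → pi.getD m 0 = pvBrd (t.take (m + 1))) :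
    ∀ j, BrdP (t.take i) j → j < i →
      (∀ kk, j < kk → kk < i → BrdP (t.take i) kk → t.getD i ' ' ≠ t.getD kk ' ') →
      BrdP (t.take i) (pvWhileJ t pi (t.getD i ' ') j j) ∧
      pvWhileJ t pi (t.getD i ' ') j j < i ∧
      (∀ kk, pvWhileJ t pi (t.getD i ' ') j j < kk → kk < i → BrdP (t.take i) kk →
        t.getD i ' ' ≠ t.getD kk ' ') ∧
      (pvWhileJ t pi (t.getD i ' ') j j = 0 ∨
        t.getD i ' ' = t.getD (pvWhileJ t pi (t.getD i ' ') j j) ' ') := by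
  intro j
  induction j using Nat.strong_induction_on with
  | _ j ih =>
    intro hb hji hinv
    match j with
    | 0 =>
      have h0 : pvWhileJ t pi (t.getD i ' ') 0 0 = 0 := rfl
      rw [h0]
      exact ⟨hb, by omega, hinv, Or.inl rfl⟩
    | jj + 1 =>
      by_cases hc : 0 < jj + 1 ∧ t.getD i ' ' ≠ t.getD (jj + 1) ' '
      · -- loop body runs: j ← pi[j-1]
        have hlen1 : (t.take (jj + 1)).length = jj + 1 := by simp; omega
        have hj2brd : pi.getD jj 0 = pvBrd (t.take (jj + 1)) := hpi jj (by omega)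
        set j2 := pi.getD (jj + 1 - 1) 0 with hj2def
        have hj2eq : j2 = pvBrd (t.take (jj + 1)) := by
          rw [hj2def]; simpa using hj2brd
        have hj2le : j2 ≤ jj := by
          have := pvBrd_le (t.take (jj + 1)); rw [hlen1] at this; omega
        have hchain : ∀ j', 0 < j' → j' ≤ j2 → pi.getD (j' - 1) 0 < j' := by
          intro j' h1 h2
          have hlt : j' - 1 < i := by omega
          have := hpi (j' - 1) hlt
          rw [this]
          have hL : (t.take (j' - 1 + 1)).length = j' - 1 + 1 := by simp; omega
          have := pvBrd_le (t.take (j' - 1 + 1)); rw [hL] at this; omega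
        have heq : pvWhileJ t pi (t.getD i ' ') (jj + 1) (jj + 1) =
            pvWhileJ t pi (t.getD i ' ') j2 j2 := by
          simp only [pvWhileJ, if_pos hc]
          exact pvWhileJ_fuel j2 hchain jj hj2le
        rw [heq]
        -- premises for the recursive call at j2
        have htw : (t.take i).take (jj + 1) = t.take (jj + 1) := by
          rw [List.take_take, Nat.min_eq_left (by omega)]
        have hwlen : (t.take i).length = i := by simp; omega
        have hb2 : BrdP (t.take i) j2 := by
          have hspec : BrdP (t.take (jj + 1)) j2 := by
            rw [hj2eq]; exact pvBrd_spec (t.take (jj + 1))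
          have := border_take_iff (t := t.take i) (a := j2) (b := jj + 1) hb
            (by omega) (by omega)
          rw [htw] at this
          exact this.mp hspec
        have hinv2 : ∀ kk, j2 < kk → kk < i → BrdP (t.take i) kk →
            t.getD i ' ' ≠ t.getD kk ' ' := by
          intro kk h1 h2 hbk
          rcases Nat.lt_trichotomy kk (jj + 1) with hlt | heq' | hgt
          · exfalso
            have hbk2 : BrdP (t.take (jj + 1)) kk := by
              have := border_take_iff (t := t.take i) (a := kk) (b := jj + 1) hb
                (by omega) (by omega)
              rw [htw] at this
              exact this.mpr hbk
            have : kk ≤ pvBrd (t.take (jj + 1)) := by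
              apply le_pvBrd hbk2; rw [hlen1]; omega
            omega
          · rw [heq']; exact hc.2
          · exact hinv kk (by omega) h2 hbk
        exact ih j2 (by omega) hb2 (by omega) hinv2
      · -- loop exits: 0 < j, so the characters match
        push Not at hc
        have hm : t.getD i ' ' = t.getD (jj + 1) ' ' := hc (by omega)
        have heq : pvWhileJ t pi (t.getD i ' ') (jj + 1) (jj + 1) = jj + 1 := by
          simp only [pvWhileJ]
          rw [if_neg (by push Not; intro _; simpa using hm)]
        rw [heq]
        exact ⟨hb, hji, hinv, Or.inr hm⟩

lemma pvPFStep_spec {t : List Char} {pi : List Nat} {i : Nat}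
    (hi : i < t.length) (hi1 : 1 ≤ i) (hlen : pi.length = t.length)
    (hpi : ∀ m, m < i → pi.getD m 0 = pvBrd (t.take (m + 1))) :
    (pvPFStep t pi i).length = t.length ∧
    (∀ m, m < i + 1 → (pvPFStep t pi i).getD m 0 = pvBrd (t.take (m + 1))) := by
  have hwlen : (t.take i).length = i := by simp; omega
  -- j0 = pi[i-1] = Brd (t.take i)
  have hj0 : pi.getD (i - 1) 0 = pvBrd (t.take i) := by
    have h := hpi (i - 1) (by omega)
    have h2 : i - 1 + 1 = i := by omega
    rw [h2] at h
    exact h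
  have hj0b : BrdP (t.take i) (pvBrd (t.take i)) := pvBrd_spec (t.take i)
  have hj0lt : pvBrd (t.take i) < i := by
    have := pvBrd_le (t.take i); rw [hwlen] at this; omega
  have hinv0 : ∀ kk, pvBrd (t.take i) < kk → kk < i → BrdP (t.take i) kk →
      t.getD i ' ' ≠ t.getD kk ' ' := by
    intro kk h1 h2 hbk
    exfalso
    have : kk ≤ pvBrd (t.take i) := by
      apply le_pvBrd hbk; rw [hwlen]; omega
    omega
  obtain ⟨hbj1, hj1lt, hinv1, hor1⟩ :=
    pvWhileJ_spec hi hi1 hpi (pvBrd (t.take i)) hj0b hj0lt hinv0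
  set j1 := pvWhileJ t pi (t.getD i ' ') (pvBrd (t.take i)) (pvBrd (t.take i)) with hj1def
  -- the final value written at position i equals Brd (t.take (i+1))
  have htarget : (if t.getD i ' ' = t.getD j1 ' ' then j1 + 1 else j1) =
      pvBrd (t.take (i + 1)) := by
    have hlen1 : (t.take (i + 1)).length = i + 1 := by simp; omega
    by_cases hm : t.getD i ' ' = t.getD j1 ' '
    · rw [if_pos hm]
      have hballs : BrdP (t.take (i + 1)) (j1 + 1) := by
        rw [border_succ_iff hi (by omega)]
        exact ⟨hbj1, hm.symm⟩
      refine le_antisymm ?_ ?_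
      · apply le_pvBrd hballs; rw [hlen1]; omega
      · -- maximality
        rcases Nat.eq_zero_or_pos (pvBrd (t.take (i + 1))) with h0 | hpos
        · omega
        · obtain ⟨kk, hkk⟩ := Nat.exists_eq_succ_of_ne_zero (by omega :
            pvBrd (t.take (i + 1)) ≠ 0)
          have hbm : BrdP (t.take (i + 1)) (kk + 1) := by
            have h0 := pvBrd_spec (t.take (i + 1))
            rw [hkk] at h0
            exact h0
          have hle : pvBrd (t.take (i + 1)) ≤ i := by
            have := pvBrd_le (t.take (i + 1)); rw [hlen1] at this; omega
          rw [border_succ_iff hi (by omega)] at hbm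
          obtain ⟨hb', hcm⟩ := hbm
          by_cases hgt : j1 < kk
          · exact absurd hcm.symm (hinv1 kk hgt (by omega) hb')
          · omega
    · rw [if_neg hm]
      have hj10 : j1 = 0 := by
        rcases hor1 with h | h
        · exact h
        · exact absurd h hm
      rw [hj10]
      by_contra hne
      have hpos : 0 < pvBrd (t.take (i + 1)) := Nat.pos_of_ne_zero (fun h => hne h.symm)
      obtain ⟨kk, hkk⟩ := Nat.exists_eq_succ_of_ne_zero (by omega :
        pvBrd (t.take (i + 1)) ≠ 0)
      have hbm : BrdP (t.take (i + 1)) (kk + 1) := by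
        have h0 := pvBrd_spec (t.take (i + 1))
        rw [hkk] at h0
        exact h0
      have hlen1 : (t.take (i + 1)).length = i + 1 := by simp; omega
      have hle : pvBrd (t.take (i + 1)) ≤ i := by
        have := pvBrd_le (t.take (i + 1)); rw [hlen1] at this; omega
      rw [border_succ_iff hi (by omega)] at hbm
      obtain ⟨hb', hcm⟩ := hbm
      rcases Nat.eq_zero_or_pos kk with h0 | hposk
      · subst h0
        rw [hj10] at hm
        exact hm hcm.symm
      · exact hinv1 kk (by omega) (by omega) hb' hcm.symm
  constructor
  · simp [pvPFStep]
    omega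
  · intro m hm
    simp only [pvPFStep]
    rw [hj0, ← hj1def]
    by_cases hmi : m = i
    · subst hmi
      rw [List.getD_eq_getElem?_getD, List.getElem?_set, if_pos rfl, if_pos (by omega)]
      simpa using htarget
    · rw [List.getD_eq_getElem?_getD, List.getElem?_set, if_neg (fun h => hmi h.symm),
        ← List.getD_eq_getElem?_getD]
      exact hpi m (by omega)

lemma pvPrefixFun_spec (t : List Char) :
    (pvPrefixFun t).length = t.length ∧
    (∀ m, m < t.length → (pvPrefixFun t).getD m 0 = pvBrd (t.take (m + 1))) := by
  have aux : ∀ c, c ≤ t.length - 1 →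
      ((List.range' 1 c).foldl (pvPFStep t) (List.replicate t.length 0)).length = t.length ∧
      (∀ m, m < c + 1 → m < t.length →
        ((List.range' 1 c).foldl (pvPFStep t) (List.replicate t.length 0)).getD m 0
          = pvBrd (t.take (m + 1))) := by
    intro c
    induction c with
    | zero =>
      intro _
      refine ⟨by simp, ?_⟩
      intro m hm1 hm2
      interval_cases m
      have h1 : (List.replicate t.length (0 : Nat)).getD 0 0 = 0 := by
        rw [List.getD_eq_getElem (_) (0:Nat) (by simpa using hm2)]
        simp
      simp only [List.range'_zero, List.foldl_nil]
      rw [h1]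
      unfold pvBrd
      have h2 : (t.take 1).length - 1 = 0 := by simp
      rw [h2, Nat.findGreatest_zero]
    | succ c ih =>
      intro hc
      have hprev := ih (by omega)
      have hconc : List.range' 1 (c + 1) = List.range' 1 c ++ [c + 1] := by
        rw [List.range'_concat]
        simp [Nat.add_comm]
      rw [hconc, List.foldl_append, List.foldl_cons, List.foldl_nil]
      have hstep := pvPFStep_spec (t := t)
        (pi := (List.range' 1 c).foldl (pvPFStep t) (List.replicate t.length 0))
        (i := c + 1) (by omega) (by omega) hprev.1
        (fun m hm => hprev.2 m (by omega) (by omega))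
      refine ⟨hstep.1, ?_⟩
      intro m hm1 hm2
      exact hstep.2 m (by omega)
  rcases Nat.eq_zero_or_pos t.length with h0 | hpos
  · constructor
    · simp [pvPrefixFun, h0]
    · intro m hm; omega
  · obtain ⟨hl, hg⟩ := aux (t.length - 1) (le_refl _)
    exact ⟨hl, fun m hm => hg m (by omega) hm⟩

lemma pvLastD_prefixFun {t : List Char} (ht : t ≠ []) : pvLastD (pvPrefixFun t) = pvBrd t := by
  have hn : 1 ≤ t.length := List.length_pos_iff.mpr ht
  obtain ⟨hl, hg⟩ := pvPrefixFun_spec t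
  unfold pvLastD
  rw [hl]
  rw [hg (t.length - 1) (by omega)]
  have : t.length - 1 + 1 = t.length := by omega
  rw [this, List.take_length]

-- B's downward scan computes the same maximum, as a Nat.findGreatest
lemma pvBorderScan_eq (t : List Char) :
    ∀ b, pvBorderScan t b =
      Nat.findGreatest (fun L => t.take L = t.drop (t.length - L)) b := by
  intro b
  induction b with
  | zero => simp [pvBorderScan]
  | succ b ih =>
    rw [pvBorderScan, Nat.findGreatest_succ]
    by_cases h : t.take (b + 1) = t.drop (t.length - (b + 1))
    · rw [if_pos h, if_pos h]
    · rw [if_neg h, if_neg h, ih]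

-- hence on a nonempty text it equals A's pi[-1]
lemma pvBorderScan_eq_lastD {t : List Char} (ht : t ≠ []) :
    pvBorderScan t (t.length - 1) = pvLastD (pvPrefixFun t) := by
  rw [pvLastD_prefixFun ht, pvBorderScan_eq]
  rfl

-- the strip loop ends at some mismatch position k with r = n - 1 - k
lemma pvStripLoop_spec (cs : List Char) :
    ∃ k : Nat, pvStripLoop cs cs.length (0, (cs.length : Int) - 1) =
        ((k : Int), (cs.length : Int) - 1 - (k : Int)) := by
  set n := cs.length with hn
  have aux : ∀ (f : Nat) (k : Nat),
      ∃ k' : Nat, pvStripLoop cs f ((k : Int), (n : Int) - 1 - (k : Int)) =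
          ((k' : Int), (n : Int) - 1 - (k' : Int)) := by
    intro f
    induction f with
    | zero => intro k; exact ⟨k, rfl⟩
    | succ f ih =>
      intro k
      simp only [pvStripLoop]
      by_cases hc : ((k : Int) < (n : Int) - 1 - (k : Int) ∧
          cs.getD ((k : Int)).toNat ' ' = cs.getD (((n : Int) - 1 - (k : Int))).toNat ' ')
      · rw [if_pos hc]
        have harg : ((k : Int) + 1, (n : Int) - 1 - (k : Int) - 1) =
            (((k + 1 : Nat) : Int), (n : Int) - 1 - ((k + 1 : Nat) : Int)) := by
          push_cast
          exact Prod.ext (by ring) (by ring)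
        rw [harg]
        exact ih (k + 1)
      · rw [if_neg hc]
        exact ⟨k, rfl⟩
  obtain ⟨k', h1⟩ := aux n 0
  refine ⟨k', ?_⟩
  have h0 : ((0 : Int), (n : Int) - 1) =
      (((0 : Nat) : Int), (n : Int) - 1 - ((0 : Nat) : Int)) := by simp
  rw [h0]
  exact h1

-- the programs agree on every input
set_option maxHeartbeats 1000000 in
lemma solve_main (s : String) : solve s = solve_alt s := by
  obtain ⟨k, hstrip⟩ := pvStripLoop_spec s.toList
  simp only [solve, solve_alt]
  rw [hstrip]
  by_cases hdone : (s.toList.length : Int) - 1 - (k : Int) ≤ (k : Int)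
  · rw [if_pos hdone, if_pos hdone]
  · rw [if_neg hdone, if_neg hdone]
    -- the middle is nonempty: its slice has length ≥ 2
    have hkn : 2 * k + 2 ≤ s.toList.length := by omega
    have hr1 : ((s.toList.length : Int) - 1 - (k : Int)) + 1 =
        (((s.toList.length - k : Nat)) : Int) := by omega
    rw [hr1]
    set mid := PySem.List.slice s.toList (some ((k : Nat) : Int))
      (some (((s.toList.length - k : Nat)) : Int)) with hmid
    have hmideq : mid = (s.toList.drop k).take (s.toList.length - k - k) := by
      rw [hmid, PySem.List.slice_natCast]
    have hmidlen : mid.length = s.toList.length - 2 * k := by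
      rw [hmideq]; simp; omega
    have hne1 : mid ++ '#' :: mid.reverse ≠ [] := by simp
    have hne2 : mid.reverse ++ '#' :: mid ≠ [] := by simp
    rw [show pvLPP mid = mid.take (pvBorderScan (mid ++ '#' :: mid.reverse)
          ((mid ++ '#' :: mid.reverse).length - 1)) by
        unfold pvLPP; rw [pvBorderScan_eq_lastD hne1],
      show pvLPS mid = PySem.List.slice mid
          (some ((mid.length : Int) - (pvBorderScan (mid.reverse ++ '#' :: mid)
            ((mid.reverse ++ '#' :: mid).length - 1) : Int))) none by
        unfold pvLPS; rw [pvBorderScan_eq_lastD hne2]]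

-- ===== VERDICT (by name: the statement is the Claim_ definition above) =====
theorem solve_spec : Claim_equal_solve := by
  intro s _
  unfold Spec_solve
  exact solve_main s
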